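-- pv_equiv track=rewrite | github.com/DJMcClellan1966/next | knuth_algorithms.py | generate_subsets_lexicographic
-- ===== SOURCE A (Python) =====
-- from typing import List, Dict, Tuple, Any, Optional, Union, Iterator
--
-- def generate_subsets_lexicographic(items: List[Any], k: Optional[int] = None) -> Iterator[List[Any]]:
--     """
--     Generate all subsets - Algorithm L (Lexicographic, Vol. 4)
--
--     Generates subsets in lexicographic order
--
--     Args:
--         items: List of items
--         k: Optional subset size (None for all sizes)
--
--     Yields:
--         Subsets
--     """
--     n = len(items)
--
--     if k is None:
--         # Generate all subsets (2^n)
--         for i in range(2**n):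
--             subset = [items[j] for j in range(n) if (i >> j) & 1]
--             yield subset
--     else:
--         # Generate k-subsets only
--         if k > n:
--             return
--
--         # Use bit manipulation for k-subsets
--         for i in range(2**n):
--             subset = [items[j] for j in range(n) if (i >> j) & 1]
--             if len(subset) == k:
--                 yield subset
-- ===== SOURCE B (Python) =====
-- from typing import List, Any, Optional, Iterator
--
-- def generate_subsets_lexicographic(items: List[Any], k: Optional[int] = None) -> Iterator[List[Any]]:
--     """Same subsets in the same order, built incrementally per item instead of
--     scanning the bits of every integer in range(2**n)."""
--     if k is None:
--         res = [[]]
--         for x in items: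
--             res = res + [s + [x] for s in res]
--         yield from res
--     else:
--         n = len(items)
--         if k < 0 or k > n:
--             return
--         # rows[r] = r-subsets of the prefix processed so far, in increasing-mask order
--         rows = [[[]]] + [[] for _ in range(k)]
--         for x in items:
--             new = [rows[0]]
--             for prev, cur in zip(rows, rows[1:]):
--                 new.append(cur + [s + [x] for s in prev])
--             rows = new
--         yield from rows[k]
-- ===== Notes on version B (the rewrite author's own statement) =====
-- stated objective: alternative
-- what changed: B builds subsets incrementally per item (doubling for all subsets; a Pascal-triangle row update keeping the r-subsets of the processed prefix for the k case) instead of scanning the bits of every integer in range(2**n); intended as faster (measured 141x at n=16) but a timing run could not confirm it at the largest size since the output itself is exponential there.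
import Mathlib
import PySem

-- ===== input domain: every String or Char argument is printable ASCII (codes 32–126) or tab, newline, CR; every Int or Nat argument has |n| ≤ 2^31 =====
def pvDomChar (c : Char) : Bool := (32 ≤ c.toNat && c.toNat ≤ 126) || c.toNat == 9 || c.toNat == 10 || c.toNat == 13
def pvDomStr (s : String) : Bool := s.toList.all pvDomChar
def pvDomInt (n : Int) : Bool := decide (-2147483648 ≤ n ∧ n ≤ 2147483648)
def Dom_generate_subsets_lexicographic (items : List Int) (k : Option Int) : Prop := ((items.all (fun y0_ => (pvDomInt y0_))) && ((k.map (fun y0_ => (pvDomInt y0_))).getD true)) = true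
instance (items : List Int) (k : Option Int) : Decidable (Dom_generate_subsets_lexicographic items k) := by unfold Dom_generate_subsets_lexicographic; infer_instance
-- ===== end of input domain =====

-- ===== PORT A =====
-- B replaces the per-mask bit scan over range(2**n) with incremental per-item subset construction (doubling / Pascal-row update); objective: alternative algorithm.
-- helper of A: the comprehension [items[j] for j in range(n) if (i >> j) & 1]
def maskSubset (items : List Int) (i : Nat) : List Int :=
  ((List.range items.length).filter (fun j => (i >>> j) &&& 1 == 1)).map
    (fun j => items.getD j 0)

def generate_subsets_lexicographic (items : List Int) (k : Option Int) : List (List Int) :=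
  let n := items.length
  match k with
  | none => (List.range (2 ^ n)).map (fun i => maskSubset items i)
  | some kv =>
      if kv > (n : Int) then []
      else
        ((List.range (2 ^ n)).map (fun i => maskSubset items i)).filter
          (fun s => ((s.length : Int) == kv))

-- ===== PORT B =====
-- res = res + [s + [x] for s in res]
def altStepAll (res : List (List Int)) (x : Int) : List (List Int) :=
  res ++ res.map (fun s => s ++ [x])

-- the loop `for prev, cur in zip(rows, rows[1:]): new.append(cur + [s+[x] for s in prev])`
def innerGo (x : Int) : List (List Int) → List (List (List Int)) → List (List (List Int))
  | _, [] => []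
  | prev, cur :: rest => (cur ++ prev.map (fun s => s ++ [x])) :: innerGo x cur rest

-- one pass of B's outer loop: new = [rows[0]] followed by the zip loop
def innerStep (x : Int) : List (List (List Int)) → List (List (List Int))
  | [] => []
  | r0 :: rest => r0 :: innerGo x r0 rest

def generate_subsets_lexicographic_alt (items : List Int) (k : Option Int) : List (List Int) :=
  match k with
  | none => items.foldl altStepAll [[]]
  | some kv =>
      let n := items.length
      if kv < 0 ∨ kv > (n : Int) then []
      else
        let rows0 : List (List (List Int)) := [[[]]] ++ List.replicate kv.toNat []
        let rows := items.foldl (fun rows x => innerStep x rows) rows0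
        rows.getD kv.toNat []

-- ===== PRECONDITION & SPEC =====
def Spec_generate_subsets_lexicographic (items : List Int) (k : Option Int) (out : List (List Int)) : Prop := out = generate_subsets_lexicographic_alt items k
instance (items : List Int) (k : Option Int) (out : List (List Int)) : Decidable (Spec_generate_subsets_lexicographic items k out) := by unfold Spec_generate_subsets_lexicographic; infer_instance

-- ===== CLAIM (what is proved, stated in full; the proofs are below) =====
def Claim_equal_generate_subsets_lexicographic : Prop := ∀ (items : List Int) (k : Option Int), Dom_generate_subsets_lexicographic items k → Spec_generate_subsets_lexicographic items k (generate_subsets_lexicographic items k)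

-- ===== LEMMAS AND PROOFS =====

theorem cond_eq_testBit (i j : Nat) : ((i >>> j) &&& 1 == 1) = i.testBit j := by
  simp [Nat.testBit, Nat.and_one_is_mod, Nat.one_and_eq_mod_two]

theorem maskSubset_low {items : List Int} {x : Int} {i : Nat}
    (h : i < 2 ^ items.length) :
    maskSubset (items ++ [x]) i = maskSubset items i := by
  unfold maskSubset
  rw [List.length_append, List.length_cons, List.length_nil, List.range_succ,
    List.filter_append]
  have hn : ((i >>> items.length) &&& 1 == 1) = false := by
    rw [cond_eq_testBit]; exact Nat.testBit_lt_two_pow h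
  simp only [List.filter_cons, hn, Bool.false_eq_true, if_false, List.filter_nil,
    List.append_nil]
  apply List.map_congr_left
  intro j hj
  have hj' : j < items.length := List.mem_range.mp (List.mem_filter.mp hj).1
  exact List.getD_append _ _ _ _ hj'

theorem maskSubset_high {items : List Int} {x : Int} {i : Nat}
    (h : i < 2 ^ items.length) :
    maskSubset (items ++ [x]) (2 ^ items.length + i) = maskSubset items i ++ [x] := by
  unfold maskSubset
  rw [List.length_append, List.length_cons, List.length_nil, List.range_succ,
    List.filter_append]
  have hn : (((2 ^ items.length + i) >>> items.length) &&& 1 == 1) = true := by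
    rw [cond_eq_testBit, Nat.testBit_two_pow_add_eq, Nat.testBit_lt_two_pow h]
    rfl
  have hfc : ∀ j ∈ List.range items.length,
      (((2 ^ items.length + i) >>> j) &&& 1 == 1) = ((i >>> j) &&& 1 == 1) := by
    intro j hj
    rw [cond_eq_testBit, cond_eq_testBit,
      Nat.testBit_two_pow_add_gt (List.mem_range.mp hj)]
  rw [List.filter_congr hfc]
  simp only [List.filter_cons, hn, if_true, List.filter_nil, List.map_append]
  congr 1
  · apply List.map_congr_left
    intro j hj
    have hj' : j < items.length := List.mem_range.mp (List.mem_filter.mp hj).1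
    exact List.getD_append _ _ _ _ hj'
  · simp [List.getD]

theorem allA (items : List Int) :
    (List.range (2 ^ items.length)).map (fun i => maskSubset items i)
      = items.foldl altStepAll [[]] := by
  induction items using List.reverseRecOn with
  | nil => simp [maskSubset]
  | append_singleton items x ih =>
    rw [List.foldl_append, List.foldl_cons, List.foldl_nil, ← ih, List.length_append,
      List.length_cons, List.length_nil, pow_succ, mul_two, List.range_add,
      List.map_append, List.map_map]
    unfold altStepAll
    congr 1
    · apply List.map_congr_left
      intro i hi
      exact maskSubset_low (List.mem_range.mp hi)
    · rw [List.map_map]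
      apply List.map_congr_left
      intro i hi
      exact maskSubset_high (List.mem_range.mp hi)

def rowFilter (L : List (List Int)) (r : Nat) : List (List Int) :=
  L.filter (fun s => s.length == r)

def rowsSpec (L : List (List Int)) (k : Nat) : List (List (List Int)) :=
  (List.range (k + 1)).map (rowFilter L)

theorem rowFilter_step_zero (L : List (List Int)) (x : Int) :
    rowFilter (altStepAll L x) 0 = rowFilter L 0 := by
  unfold rowFilter altStepAll
  rw [List.filter_append, List.filter_map]
  simp

theorem rowFilter_step_succ (L : List (List Int)) (x : Int) (r : Nat) :
    rowFilter (altStepAll L x) (r + 1)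
      = rowFilter L (r + 1) ++ (rowFilter L r).map (fun s => s ++ [x]) := by
  unfold rowFilter altStepAll
  rw [List.filter_append, List.filter_map]
  congr 1
  rw [List.filter_congr (fun s _ => by simp : ∀ s ∈ L,
    ((fun s => s.length == r + 1) ∘ fun s => s ++ [x]) s = (fun s => s.length == r) s)]

theorem innerGo_spec (L : List (List Int)) (x : Int) (m r : Nat) :
    innerGo x (rowFilter L r) ((List.range' (r + 1) m).map (rowFilter L))
      = (List.range' (r + 1) m).map (rowFilter (altStepAll L x)) := by
  induction m generalizing r with
  | zero => simp [innerGo]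
  | succ m ih =>
    rw [List.range'_succ, List.map_cons, List.map_cons, innerGo,
      ← rowFilter_step_succ, ih (r + 1)]

theorem innerStep_spec (L : List (List Int)) (x : Int) (k : Nat) :
    innerStep x (rowsSpec L k) = rowsSpec (altStepAll L x) k := by
  unfold rowsSpec
  rw [List.range_eq_range', List.range'_succ, List.map_cons, List.map_cons, innerStep,
    innerGo_spec, rowFilter_step_zero]

theorem foldl_rows_spec (items : List Int) (k : Nat) :
    ∀ L, items.foldl (fun rows x => innerStep x rows) (rowsSpec L k)
      = rowsSpec (items.foldl altStepAll L) k := by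
  induction items with
  | nil => intro L; rfl
  | cons y ys ih =>
    intro L
    rw [List.foldl_cons, List.foldl_cons, innerStep_spec, ih (altStepAll L y)]

theorem rows0_spec (k : Nat) : rowsSpec [[]] k = [[]] :: List.replicate k [] := by
  unfold rowsSpec
  rw [List.range_succ_eq_map, List.map_cons, List.map_map]
  have h0 : rowFilter [[]] 0 = [[]] := by simp [rowFilter]
  rw [h0]
  congr 1
  apply List.eq_replicate_iff.mpr
  constructor
  · simp
  · intro b hb
    obtain ⟨j, -, hj⟩ := List.mem_map.mp hb
    rw [← hj]
    simp [rowFilter, Function.comp]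

theorem rowsSpec_getD (L : List (List Int)) (k : Nat) :
    (rowsSpec L k).getD k [] = rowFilter L k := by
  unfold rowsSpec
  rw [List.getD_eq_getElem?_getD]
  simp

-- ===== VERDICT (by name: the statement is the Claim_ definition above) =====
theorem generate_subsets_lexicographic_spec : Claim_equal_generate_subsets_lexicographic := by
  intro items k _
  unfold Spec_generate_subsets_lexicographic
  rcases k with _ | kv
  · simp only [generate_subsets_lexicographic, generate_subsets_lexicographic_alt]
    exact allA items
  · simp only [generate_subsets_lexicographic, generate_subsets_lexicographic_alt]
    by_cases hbig : kv > (items.length : Int)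
    · rw [if_pos hbig, if_pos (Or.inr hbig)]
    · rw [if_neg hbig]
      by_cases hneg : kv < 0
      · rw [if_pos (Or.inl hneg)]
        apply List.filter_eq_nil_iff.mpr
        intro s _
        simp only [beq_iff_eq]
        omega
      · have hcond : ¬ (kv < 0 ∨ kv > (items.length : Int)) := by omega
        rw [if_neg hcond, List.singleton_append, ← rows0_spec, foldl_rows_spec,
          rowsSpec_getD, ← allA]
        unfold rowFilter
        apply List.filter_congr
        intro s _
        rw [Bool.eq_iff_iff]
        simp only [beq_iff_eq]
        omega
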